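-- pv_equiv track=rewrite | github.com/BombelX/WDI | tests/maskitritowe.py | check_mask
-- ===== SOURCE A (Python) =====
-- def check_mask(mask,t1,t2):
--     sum = 0
--     flgt1 = flgt2 = False
--     i= 0
--     while mask > 0:
--         trit = mask%3
--         match trit:
--             case 0:
--                 sum += t1[i]
--                 flgt1 = True
--             case 1:
--                 sum += t2[i]
--                 flgt2 = True
--             case 2:
--                 sum += t1[i] + t2[i]
--                 flgt1 = flgt2 = True
--         mask //= 3
--         i+=1
--     if flgt1 and flgt2:
--         return sum
--     else:
--         return 0
-- ===== SOURCE B (Python) =====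
-- def check_mask(mask, t1, t2):
--     trits = []
--     m = mask
--     while m > 0:
--         trits.append(m % 3)
--         m //= 3
--     s1 = sum(t1[i] for i, tr in enumerate(trits) if tr != 1)
--     s2 = sum(t2[i] for i, tr in enumerate(trits) if tr >= 1)
--     flg1 = any(tr != 1 for tr in trits)
--     flg2 = any(tr >= 1 for tr in trits)
--     return s1 + s2 if flg1 and flg2 else 0
-- ===== Notes on version B (the rewrite author's own statement) =====
-- stated objective: alternative
-- what changed: B first materializes the base-3 digits into a list, then computes the two sums and the two presence flags in separate guarded passes over that list, replacing A's single stateful match-based while loop.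
import Mathlib
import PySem

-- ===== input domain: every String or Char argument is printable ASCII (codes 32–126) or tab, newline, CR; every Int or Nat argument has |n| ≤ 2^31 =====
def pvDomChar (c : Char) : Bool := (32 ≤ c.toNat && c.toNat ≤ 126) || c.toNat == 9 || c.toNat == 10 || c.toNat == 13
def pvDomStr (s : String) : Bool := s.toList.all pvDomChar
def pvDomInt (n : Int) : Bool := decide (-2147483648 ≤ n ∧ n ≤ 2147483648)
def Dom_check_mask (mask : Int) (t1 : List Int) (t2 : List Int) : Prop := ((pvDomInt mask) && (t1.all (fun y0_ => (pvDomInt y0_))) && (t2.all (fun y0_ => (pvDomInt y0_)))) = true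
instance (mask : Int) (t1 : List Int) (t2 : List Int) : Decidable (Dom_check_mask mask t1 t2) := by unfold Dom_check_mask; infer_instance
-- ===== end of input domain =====

-- B keeps A's behaviour but uses a different decomposition: digits first, then separate passes (objective: alternative).

-- ===== PORT A =====
-- literal port of A's while loop: state (mask, i, sum, flgt1, flgt2); t1[i]/t2[i] via pyGetD
-- (Pre_ guarantees the index is in range wherever it is read, so the default is never used)
def checkMaskLoop (t1 t2 : List Int) (mask : Int) (i : Nat) (sum : Int) (f1 f2 : Bool) : Int :=
  if _h : mask > 0 then
    let trit := PySem.Int.mod mask 3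
    if trit = 0 then
      checkMaskLoop t1 t2 (PySem.Int.floordiv mask 3) (i+1) (sum + PySem.List.pyGetD t1 (i : Int) 0) true f2
    else if trit = 1 then
      checkMaskLoop t1 t2 (PySem.Int.floordiv mask 3) (i+1) (sum + PySem.List.pyGetD t2 (i : Int) 0) f1 true
    else
      checkMaskLoop t1 t2 (PySem.Int.floordiv mask 3) (i+1) (sum + (PySem.List.pyGetD t1 (i : Int) 0 + PySem.List.pyGetD t2 (i : Int) 0)) true true
  else if f1 && f2 then sum else 0
termination_by mask.toNat
decreasing_by
  all_goals
    simp only [PySem.Int.floordiv_eq_ediv_of_pos (by norm_num : (0:Int) < 3)]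
    omega

def check_mask (mask : Int) (t1 : List Int) (t2 : List Int) : Int :=
  checkMaskLoop t1 t2 mask 0 0 false false

-- ===== PORT B =====
-- Source B's first while loop: collect the base-3 digits of mask into a list
def trits3 (mask : Int) : List Int :=
  if _h : mask > 0 then PySem.Int.mod mask 3 :: trits3 (PySem.Int.floordiv mask 3) else []
termination_by mask.toNat
decreasing_by
  simp only [PySem.Int.floordiv_eq_ediv_of_pos (by norm_num : (0:Int) < 3)]
  omega

def check_mask_alt (mask : Int) (t1 : List Int) (t2 : List Int) : Int :=
  let trits := trits3 mask
  let s1 := (PySem.List.enumerate trits 0).foldl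
    (fun a p => if p.2 ≠ 1 then a + PySem.List.pyGetD t1 p.1 0 else a) 0
  let s2 := (PySem.List.enumerate trits 0).foldl
    (fun a p => if 1 ≤ p.2 then a + PySem.List.pyGetD t2 p.1 0 else a) 0
  let flg1 := trits.any (fun tr => decide (tr ≠ 1))
  let flg2 := trits.any (fun tr => decide (1 ≤ tr))
  if flg1 && flg2 then s1 + s2 else 0

-- ===== PRECONDITION & SPEC =====
-- Pre_ excludes exactly the inputs on which A raises IndexError: some base-3 digit of mask
-- (digit k exists iff 3^k ≤ mask) demands t1[k] (digit 0 or 2) or t2[k] (digit 1 or 2) at a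
-- position k beyond that list's length. The bound k < 32 is loose: inside Dom_check_mask,
-- mask ≤ 2^31 < 3^21, so every existing digit has k < 21.
def Pre_check_mask (mask : Int) (t1 : List Int) (t2 : List Int) : Prop :=
  ∀ k : Nat, k < 32 → (3:Int)^k ≤ mask →
    ((mask / 3^k) % 3 ≠ 1 → (k : Int) < t1.length) ∧ (1 ≤ (mask / 3^k) % 3 → (k : Int) < t2.length)
instance (mask : Int) (t1 : List Int) (t2 : List Int) : Decidable (Pre_check_mask mask t1 t2) := by
  unfold Pre_check_mask; infer_instance

def pvWitness_check_mask : Int × List Int × List Int := (5, [1, 2], [3, 4])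

def Spec_check_mask (mask : Int) (t1 : List Int) (t2 : List Int) (out : Int) : Prop := out = check_mask_alt mask t1 t2
instance (mask : Int) (t1 : List Int) (t2 : List Int) (out : Int) : Decidable (Spec_check_mask mask t1 t2 out) := by unfold Spec_check_mask; infer_instance

-- ===== CLAIM (what is proved, stated in full; the proofs are below) =====
def Claim_equal_check_mask : Prop := ∀ (mask : Int) (t1 : List Int) (t2 : List Int), Dom_check_mask mask t1 t2 → Pre_check_mask mask t1 t2 → Spec_check_mask mask t1 t2 (check_mask mask t1 t2)

-- ===== LEMMAS AND PROOFS =====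

-- proof-only helpers: positional sums of the two tables along a digit list
def S1 (t1 : List Int) : List Int → Nat → Int
  | [], _ => 0
  | tr :: ts, i => (if tr ≠ 1 then PySem.List.pyGetD t1 (i : Int) 0 else 0) + S1 t1 ts (i+1)

def S2 (t2 : List Int) : List Int → Nat → Int
  | [], _ => 0
  | tr :: ts, i => (if 1 ≤ tr then PySem.List.pyGetD t2 (i : Int) 0 else 0) + S2 t2 ts (i+1)

theorem trits3_pos (mask : Int) (h : mask > 0) :
    trits3 mask = PySem.Int.mod mask 3 :: trits3 (PySem.Int.floordiv mask 3) := by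
  rw [trits3]; simp [h]

theorem trits3_nonpos (mask : Int) (h : ¬ mask > 0) : trits3 mask = [] := by
  rw [trits3]; simp [h]

theorem trits3_mem_nonneg (mask : Int) : ∀ tr ∈ trits3 mask, 0 ≤ tr ∧ tr < 3 := by
  generalize hn : mask.toNat = n
  induction n using Nat.strong_induction_on generalizing mask with
  | _ n ih =>
    by_cases h : mask > 0
    · rw [trits3_pos mask h]
      intro tr htr
      rcases List.mem_cons.mp htr with h1 | h1
      · subst h1
        constructor
        · simp only [PySem.Int.mod_eq_emod_of_pos (a := mask) (by norm_num : (0:Int) < 3)]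
          omega
        · simp only [PySem.Int.mod_eq_emod_of_pos (a := mask) (by norm_num : (0:Int) < 3)]
          omega
      · refine ih (PySem.Int.floordiv mask 3).toNat ?_ _ rfl tr h1
        simp only [PySem.Int.floordiv_eq_ediv_of_pos (by norm_num : (0:Int) < 3)]
        omega
    · rw [trits3_nonpos mask h] at *
      intro tr htr; simp at htr

-- the list-level counterpart of A's loop
def bLoop (t1 t2 : List Int) : List Int → Nat → Int → Bool → Bool → Int
  | [], _, s, f1, f2 => if f1 && f2 then s else 0
  | tr :: ts, i, s, f1, f2 =>
    if tr = 0 then bLoop t1 t2 ts (i+1) (s + PySem.List.pyGetD t1 (i : Int) 0) true f2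
    else if tr = 1 then bLoop t1 t2 ts (i+1) (s + PySem.List.pyGetD t2 (i : Int) 0) f1 true
    else bLoop t1 t2 ts (i+1) (s + (PySem.List.pyGetD t1 (i : Int) 0 + PySem.List.pyGetD t2 (i : Int) 0)) true true

theorem checkMaskLoop_eq_bLoop (t1 t2 : List Int) (mask : Int) (i : Nat) (s : Int) (f1 f2 : Bool) :
    checkMaskLoop t1 t2 mask i s f1 f2 = bLoop t1 t2 (trits3 mask) i s f1 f2 := by
  generalize hn : mask.toNat = n
  induction n using Nat.strong_induction_on generalizing mask i s f1 f2 with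
  | _ n ih =>
    by_cases h : mask > 0
    · rw [checkMaskLoop, trits3_pos mask h]
      have hlt : (PySem.Int.floordiv mask 3).toNat < n := by
        simp only [PySem.Int.floordiv_eq_ediv_of_pos (by norm_num : (0:Int) < 3)]
        omega
      simp only [h, dite_true, bLoop]
      split_ifs <;> exact ih _ hlt _ _ _ _ _ rfl
    · rw [checkMaskLoop, trits3_nonpos mask h]
      simp [h, bLoop]

theorem bLoop_char (t1 t2 : List Int) (ts : List Int) (hts : ∀ tr ∈ ts, 0 ≤ tr) :
    ∀ (i : Nat) (s : Int) (f1 f2 : Bool),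
      bLoop t1 t2 ts i s f1 f2 =
        if (f1 || ts.any (fun tr => decide (tr ≠ 1))) && (f2 || ts.any (fun tr => decide (1 ≤ tr)))
        then s + S1 t1 ts i + S2 t2 ts i else 0 := by
  induction ts with
  | nil => intro i s f1 f2; simp [bLoop, S1, S2]
  | cons tr ts ihl =>
    intro i s f1 f2
    have htr : 0 ≤ tr := hts tr (List.mem_cons_self ..)
    have hts' : ∀ x ∈ ts, 0 ≤ x := fun x hx => hts x (List.mem_cons_of_mem _ hx)
    rcases show tr = 0 ∨ tr = 1 ∨ (tr ≠ 0 ∧ tr ≠ 1 ∧ 1 ≤ tr) from by omega with h | h | ⟨h0, h1, h2⟩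
    · subst h
      have e : bLoop t1 t2 (0 :: ts) i s f1 f2
          = bLoop t1 t2 ts (i+1) (s + PySem.List.pyGetD t1 (i : Int) 0) true f2 := by
        simp [bLoop]
      rw [e, ihl hts']
      simp only [List.any_cons, S1, S2]
      norm_num
      split_ifs <;> ring
    · subst h
      have e : bLoop t1 t2 (1 :: ts) i s f1 f2
          = bLoop t1 t2 ts (i+1) (s + PySem.List.pyGetD t2 (i : Int) 0) f1 true := by
        simp [bLoop]
      rw [e, ihl hts']
      simp only [List.any_cons, S1, S2]
      norm_num
      split_ifs <;> ring
    · have e : bLoop t1 t2 (tr :: ts) i s f1 f2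
          = bLoop t1 t2 ts (i+1)
              (s + (PySem.List.pyGetD t1 (i : Int) 0 + PySem.List.pyGetD t2 (i : Int) 0)) true true := by
        simp [bLoop, h0, h1]
      rw [e, ihl hts']
      simp only [List.any_cons, S1, S2, h2]
      norm_num
      split_ifs with hA
      · ring
      · exact absurd (Or.inr (Or.inl h1)) hA

theorem foldl_enum_S1 (t1 : List Int) (ts : List Int) :
    ∀ (i : Nat) (a : Int),
      (PySem.List.enumerate ts (i : Int)).foldl
        (fun a p => if p.2 ≠ 1 then a + PySem.List.pyGetD t1 p.1 0 else a) a = a + S1 t1 ts i := by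
  induction ts with
  | nil => intro i a; simp [PySem.List.enumerate_nil, S1]
  | cons tr ts ihl =>
    intro i a
    rw [PySem.List.enumerate_cons]
    have hcast : (i : Int) + 1 = ((i + 1 : Nat) : Int) := by push_cast; ring
    simp only [List.foldl_cons, hcast, ihl, S1]
    split_ifs <;> ring

theorem foldl_enum_S2 (t2 : List Int) (ts : List Int) :
    ∀ (i : Nat) (a : Int),
      (PySem.List.enumerate ts (i : Int)).foldl
        (fun a p => if 1 ≤ p.2 then a + PySem.List.pyGetD t2 p.1 0 else a) a = a + S2 t2 ts i := by
  induction ts with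
  | nil => intro i a; simp [PySem.List.enumerate_nil, S2]
  | cons tr ts ihl =>
    intro i a
    rw [PySem.List.enumerate_cons]
    have hcast : (i : Int) + 1 = ((i + 1 : Nat) : Int) := by push_cast; ring
    simp only [List.foldl_cons, hcast, ihl, S2]
    split_ifs <;> ring

-- ===== VERDICT (by name: the statement is the Claim_ definition above) =====
theorem check_mask_spec : Claim_equal_check_mask := by
  intro mask t1 t2 _hdom _hpre
  unfold Spec_check_mask check_mask check_mask_alt
  rw [checkMaskLoop_eq_bLoop,
      bLoop_char t1 t2 (trits3 mask) (fun tr htr => (trits3_mem_nonneg mask tr htr).1)]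
  have h1 := foldl_enum_S1 t1 (trits3 mask) 0 0
  have h2 := foldl_enum_S2 t2 (trits3 mask) 0 0
  simp only [Nat.cast_zero] at h1 h2
  simp only [h1, h2, Bool.false_or]
  split_ifs <;> ring
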